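-- pv_equiv track=rewrite | github.com/vishalsharma14/algo | string/11.ransom_note.py | can_construct_ransom_note
-- ===== SOURCE A (Python) =====
-- def can_construct_ransom_note(ransom_string, magazine_string):
--     """
--     :param ransom_string: Ransom Note String
--     :param magazine_string: String containing letters from all the magazines
--     :return:
--         True if ransom note can be constructed
--         False if ransom note cannot be constructed
--     """
--     ransom_dict = {}
--     for char in ransom_string:
--         if ransom_dict.get(char):
--             ransom_dict[char] += 1
--         else:
--             ransom_dict[char] = 1
--
--     magazine_dict = {}
--     for char in magazine_string:
--         if magazine_dict.get(char):
--             magazine_dict[char] += 1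
--         else:
--             magazine_dict[char] = 1
--
--     for key in ransom_dict.keys():
--         if not (magazine_dict.get(key) and ransom_dict[key] <= magazine_dict[key]):
--             return False
--     return True
-- ===== SOURCE B (Python) =====
-- def can_construct_ransom_note(ransom_string, magazine_string):
--     """
--     :param ransom_string: Ransom Note String
--     :param magazine_string: String containing letters from all the magazines
--     :return:
--         True if ransom note can be constructed
--         False if ransom note cannot be constructed
--     """
--     supply = {}
--     for char in magazine_string:
--         supply[char] = supply.get(char, 0) + 1
--     for char in ransom_string:
--         remaining = supply.get(char, 0)
--         if remaining == 0:
--             return False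
--         supply[char] = remaining - 1
--     return True
-- ===== Notes on version B (the rewrite author's own statement) =====
-- stated objective: simpler
-- what changed: B builds only one frequency table (for the magazine) and consumes it during a single scan of the ransom string with early exit, instead of building two tables and comparing counts key by key.
import Mathlib
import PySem

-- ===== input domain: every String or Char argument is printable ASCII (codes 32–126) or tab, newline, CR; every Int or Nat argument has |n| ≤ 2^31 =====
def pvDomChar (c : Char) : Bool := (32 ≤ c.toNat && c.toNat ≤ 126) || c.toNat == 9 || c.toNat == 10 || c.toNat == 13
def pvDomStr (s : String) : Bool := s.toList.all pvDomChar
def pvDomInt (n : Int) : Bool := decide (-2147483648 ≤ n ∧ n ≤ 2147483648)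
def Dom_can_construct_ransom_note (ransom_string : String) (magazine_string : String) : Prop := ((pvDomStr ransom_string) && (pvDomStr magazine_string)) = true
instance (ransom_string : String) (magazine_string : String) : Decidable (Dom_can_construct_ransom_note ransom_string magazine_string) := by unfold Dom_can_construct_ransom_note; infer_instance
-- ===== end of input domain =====

-- B builds one consumable magazine count table and scans the ransom string once with early exit,
-- instead of A's two count tables compared key by key; objective: simpler.


-- ===== PORT A =====
-- one `for char in …` body of A: if d.get(char): d[char] += 1 else: d[char] = 1
def pvCountA (d : PySem.Dict Char Int) (c : Char) : PySem.Dict Char Int :=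
  if ((d.get? c).getD 0) ≠ 0 then d.insert c ((d.get? c).getD 0 + 1)
  else d.insert c 1

def can_construct_ransom_note (ransom_string : String) (magazine_string : String) : Bool :=
  let ransom_dict := ransom_string.toList.foldl pvCountA PySem.Dict.empty
  let magazine_dict := magazine_string.toList.foldl pvCountA PySem.Dict.empty
  -- `for key in ransom_dict.keys(): if not (magazine_dict.get(key) and …): return False` / `return True`
  ransom_dict.keys.all (fun key =>
    !(((magazine_dict.get? key).getD 0) == 0) && decide (ransom_dict.getD key 0 ≤ (magazine_dict.get? key).getD 0))

-- ===== PORT B =====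
-- the ransom scan of B: consume `supply`, early return False when a needed char is exhausted
def pvConsume (supply : PySem.Dict Char Int) : List Char → Bool
  | [] => true
  | c :: cs =>
      let remaining := supply.getD c 0
      if remaining == 0 then false
      else pvConsume (supply.insert c (remaining - 1)) cs

def can_construct_ransom_note_alt (ransom_string : String) (magazine_string : String) : Bool :=
  let supply := magazine_string.toList.foldl (fun d c => d.insert c (d.getD c 0 + 1)) PySem.Dict.empty
  pvConsume supply ransom_string.toList

-- ===== PRECONDITION & SPEC =====
def Spec_can_construct_ransom_note (ransom_string : String) (magazine_string : String) (out : Bool) : Prop := out = can_construct_ransom_note_alt ransom_string magazine_string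
instance (ransom_string : String) (magazine_string : String) (out : Bool) : Decidable (Spec_can_construct_ransom_note ransom_string magazine_string out) := by unfold Spec_can_construct_ransom_note; infer_instance

-- ===== CLAIM (what is proved, stated in full; the proofs are below) =====
def Claim_equal_can_construct_ransom_note : Prop := ∀ (ransom_string : String) (magazine_string : String), Dom_can_construct_ransom_note ransom_string magazine_string → Spec_can_construct_ransom_note ransom_string magazine_string (can_construct_ransom_note ransom_string magazine_string)

-- ===== LEMMAS AND PROOFS =====

-- Since no value 0 is ever stored, A's counting step is exactly the 'insert (getD+1)' step.
theorem pvCountA_eq (d : PySem.Dict Char Int) (c : Char) :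
    pvCountA d c = d.insert c (d.getD c 0 + 1) := by
  unfold pvCountA
  rw [← PySem.Dict.getD_eq_get?_getD]
  split_ifs with h
  · rfl
  · simp at h
    rw [h]
    norm_num

theorem foldl_pvCountA (l : List Char) :
    l.foldl pvCountA PySem.Dict.empty = PySem.Dict.counter l := by
  rw [← PySem.Dict.foldl_insert_getD_add_one_eq_counter]
  have hf : pvCountA = fun d c => d.insert c (d.getD c 0 + 1) :=
    funext fun d => funext fun c => pvCountA_eq d c
  rw [hf]

-- A is the key-by-key comparison of the two counters.
theorem portA_char (r m : List Char) :
    (r.foldl pvCountA PySem.Dict.empty).keys.all (fun key =>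
      !(((m.foldl pvCountA PySem.Dict.empty).get? key).getD 0 == 0) &&
        decide ((r.foldl pvCountA PySem.Dict.empty).getD key 0 ≤ ((m.foldl pvCountA PySem.Dict.empty).get? key).getD 0))
      = decide (∀ c ∈ r, (r.count c : Int) ≤ (m.count c : Int)) := by
  rw [foldl_pvCountA, foldl_pvCountA]
  rcases Bool.eq_false_or_eq_true (decide (∀ c ∈ r, (r.count c : Int) ≤ (m.count c : Int))) with h | h <;> rw [h]
  · rw [List.all_eq_true]
    intro c hc
    rw [PySem.Dict.keys_counter, PySem.Set.mem_ofList _ _] at hc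
    have hle := (decide_eq_true_iff).1 h c hc
    simp only [← PySem.Dict.getD_eq_get?_getD, PySem.Dict.getD_counter]
    have hr : (1 : Int) ≤ (r.count c : Int) := by exact_mod_cast List.one_le_count_iff.2 hc
    simp only [Bool.and_eq_true, Bool.not_eq_true', beq_eq_false_iff_ne, decide_eq_true_iff]
    exact ⟨by omega, hle⟩
  · rw [List.all_eq_false]
    simp only [decide_eq_false_iff_not, not_forall] at h
    obtain ⟨c, hc, hle⟩ := h
    refine ⟨c, ?_, ?_⟩
    · rw [PySem.Dict.keys_counter]; exact (PySem.Set.mem_ofList _ _).2 hc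
    · simp only [← PySem.Dict.getD_eq_get?_getD, PySem.Dict.getD_counter]
      rw [Bool.not_eq_true, Bool.and_eq_false_iff]
      right
      exact decide_eq_false hle

-- B's scan succeeds iff every needed count is available in the supply.
theorem pvConsume_iff (l : List Char) (supply : PySem.Dict Char Int)
    (hpos : ∀ c, 0 ≤ supply.getD c 0) :
    pvConsume supply l = decide (∀ c ∈ l, (l.count c : Int) ≤ supply.getD c 0) := by
  induction l generalizing supply with
  | nil => simp [pvConsume]
  | cons c cs ih =>
    unfold pvConsume
    simp only []
    split_ifs with h
    · have h0 : supply.getD c 0 = 0 := by simpa using h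
      symm
      simp only [decide_eq_false_iff_not, not_forall]
      refine ⟨c, List.mem_cons_self, ?_⟩
      have : (1 : Int) ≤ ((c :: cs).count c : Int) := by
        exact_mod_cast List.one_le_count_iff.2 List.mem_cons_self
      omega
    · have hr : (1 : Int) ≤ supply.getD c 0 := by
        have := hpos c; simp at h; omega
      rw [ih _ ?_]
      · simp only [decide_eq_decide]
        constructor
        · intro hall d hd
          by_cases hdc : d = c
          · subst hdc
            rw [List.count_cons_self]
            by_cases hmem : d ∈ cs
            · have := hall d hmem
              rw [PySem.Dict.getD_insert, if_pos rfl] at this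
              push_cast at this ⊢
              omega
            · rw [List.count_eq_zero_of_not_mem hmem]
              push_cast
              omega
          · rcases List.mem_cons.1 hd with heq | hmem
            · exact absurd heq hdc
            · have := hall d hmem
              rw [PySem.Dict.getD_insert, if_neg hdc] at this
              rwa [List.count_cons_of_ne (fun h => hdc h.symm)]
        · intro hall d hd
          rw [PySem.Dict.getD_insert]
          by_cases hdc : d = c
          · subst hdc
            have := hall d (List.mem_cons_self)
            rw [if_pos rfl]
            rw [List.count_cons_self] at this
            push_cast at this ⊢
            omega
          · rw [if_neg hdc]
            have := hall d (List.mem_cons_of_mem _ hd)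
            rwa [List.count_cons_of_ne (fun h => hdc h.symm)] at this
      · intro d
        rw [PySem.Dict.getD_insert]
        by_cases hdc : d = c
        · rw [if_pos hdc]; omega
        · rw [if_neg hdc]; exact hpos d

-- ===== VERDICT (by name: the statement is the Claim_ definition above) =====
theorem can_construct_ransom_note_spec : Claim_equal_can_construct_ransom_note := by
  intro r m _
  unfold Spec_can_construct_ransom_note can_construct_ransom_note can_construct_ransom_note_alt
  rw [portA_char, PySem.Dict.foldl_insert_getD_add_one_eq_counter,
    pvConsume_iff _ _ (fun c => by rw [PySem.Dict.getD_counter]; positivity)]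
  simp only [decide_eq_decide]
  constructor <;> intro h c hc <;> have := h c hc
  · rwa [PySem.Dict.getD_counter]
  · rwa [PySem.Dict.getD_counter] at this
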